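-- pv_equiv track=rewrite | github.com/zeyu-chen/25t1-comp9021-labs | Lab 3/Solutions/ex_4_sol.py | f4_3
-- ===== SOURCE A (Python) =====
-- def f4_3(n: int, base: int) -> dict[int, tuple[int]]:
--     """
--     Creates a dictionary mapping integers from 0 to n to their representation in the specified base.
--
--     Uses Python's divmod function for cleaner code and more efficient conversion.
--
--     Args:
--         n: The upper limit of numbers to convert (inclusive)
--         base: The target base (between 2 and 9)
--
--     Returns:
--         A dictionary where keys are integers from 0 to n and values are tuples
--         representing those numbers in the specified base
--     """
--     result = {}
--
--     # Handle special case for 0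
--     result[0] = (0,)
--
--     # Process each number from 1 to n
--     for num in range(1, n + 1):
--         digits = []
--         temp = num
--
--         # Convert using divmod for cleaner code
--         while temp > 0:
--             # divmod returns quotient and remainder in one operation
--             temp, remainder = divmod(temp, base)
--             digits.append(remainder)
--
--         # Reverse digits and convert to tuple
--         result[num] = tuple(reversed(digits))
--
--     return result
-- ===== SOURCE B (Python) =====
-- def f4_3(n: int, base: int) -> dict[int, tuple[int]]:
--     """
--     Maps each integer 0..n to the tuple of its base-`base` digits
--     (most significant first, no leading zeros except for 0 itself).
--
--     Instead of converting every number independently with divmod, this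
--     threads the digit list across numbers: each entry is obtained from
--     the previous one by an add-one-with-carry on the digits.
--     """
--     def inc(digits):
--         # increment a least-significant-first digit list by one
--         if not digits:
--             return [1]
--         d = digits[0] + 1
--         if d == base:
--             return [0] + inc(digits[1:])
--         return [d] + digits[1:]
--
--     result = {0: (0,)}
--     cur = []  # least-significant-first digits of the current number
--     for num in range(1, n + 1):
--         cur = inc(cur)
--         result[num] = tuple(reversed(cur))
--     return result
-- ===== Notes on version B (the rewrite author's own statement) =====
-- stated objective: alternative
-- what changed: Instead of converting each number 0..n independently via repeated divmod, B threads a running digit list across the loop and obtains each entry from the previous one by a single add-one-with-carry on the digits.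
-- outside the precondition, e.g. on f4_3(2, -2): A returns {0: (0,), 1: (-1,), 2: (0,)}, B returns {0: (0,), 1: (1,), 2: (2,)}; on f4_3(1, 0): A raises ZeroDivisionError, B returns {0: (0,), 1: (1,)}; on f4_3(1, 1): A does not finish within the time limit, B returns {0: (0,), 1: (1,)}
import Mathlib
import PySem

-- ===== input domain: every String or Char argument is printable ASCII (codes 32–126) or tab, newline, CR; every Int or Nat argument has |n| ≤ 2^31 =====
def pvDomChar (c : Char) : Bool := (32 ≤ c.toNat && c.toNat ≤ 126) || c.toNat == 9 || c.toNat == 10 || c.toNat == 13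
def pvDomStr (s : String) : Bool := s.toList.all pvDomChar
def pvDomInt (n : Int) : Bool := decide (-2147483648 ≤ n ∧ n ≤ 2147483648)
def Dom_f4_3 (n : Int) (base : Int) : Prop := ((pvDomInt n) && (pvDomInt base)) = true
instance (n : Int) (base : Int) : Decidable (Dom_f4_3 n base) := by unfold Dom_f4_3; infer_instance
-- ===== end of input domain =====

-- B replaces per-number divmod conversion by threading one digit list across the loop,
-- incrementing it with a carry for each successive number (alternative algorithm, same cost class).


-- ===== PORT A =====
-- A's inner `while temp > 0` loop collecting divmod remainders (LSB first).
-- Totalized with fuel; fuel `temp.toNat + 1` suffices on Pre_ (base ≥ 2), where the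
-- quotient strictly decreases each step, so the port computes exactly what A computes there.
def f43Digits (fuel : Nat) (temp : Int) (base : Int) : List Int :=
  match fuel with
  | 0 => []
  | fuel + 1 =>
    if temp > 0 then
      PySem.Int.mod temp base :: f43Digits fuel (PySem.Int.floordiv temp base) base
    else []

def f4_3 (n : Int) (base : Int) : List (Int × List Int) :=
  -- result = {0: (0,)}; keys 0, 1, …, n are pairwise distinct and inserted in order,
  -- so the dict is exactly this assoc list built by appending.
  (PySem.List.pyRange 1 (n + 1) 1).foldl
    (fun res num => res ++ [(num, (f43Digits (num.toNat + 1) num base).reverse)])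
    [(0, [0])]

-- ===== PORT B =====
-- Source B's `inc`: add one to a least-significant-first digit list, carrying.
def f43Inc (base : Int) : List Int → List Int
  | [] => [1]
  | d :: rest => if d + 1 == base then 0 :: f43Inc base rest else (d + 1) :: rest

def f4_3_alt (n : Int) (base : Int) : List (Int × List Int) :=
  ((PySem.List.pyRange 1 (n + 1) 1).foldl
    (fun (st : List (Int × List Int) × List Int) num =>
      let cur := f43Inc base st.2
      (st.1 ++ [(num, cur.reverse)], cur))
    ([(0, [0])], [])).1

-- ===== PRECONDITION & SPEC =====
-- Pre_ excludes bases below 2 when n ≥ 1 (the loop body actually runs): there A raises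
-- ZeroDivisionError for base 0, loops forever for base 1, and for negative bases returns
-- accidental negative-digit values outside the function's documented base range 2..9.
def Pre_f4_3 (n : Int) (base : Int) : Prop := 2 ≤ base ∨ n ≤ 0
instance (n : Int) (base : Int) : Decidable (Pre_f4_3 n base) := by unfold Pre_f4_3; infer_instance
def pvWitness_f4_3 : Int × Int := (5, 2)

def Spec_f4_3 (n : Int) (base : Int) (out : List (Int × List Int)) : Prop := out = f4_3_alt n base
instance (n : Int) (base : Int) (out : List (Int × List Int)) : Decidable (Spec_f4_3 n base out) := by unfold Spec_f4_3; infer_instance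

-- ===== CLAIM (what is proved, stated in full; the proofs are below) =====
def Claim_equal_f4_3 : Prop := ∀ (n : Int) (base : Int), Dom_f4_3 n base → Pre_f4_3 n base → Spec_f4_3 n base (f4_3 n base)

-- ===== LEMMAS AND PROOFS =====

theorem f43Digits_nonpos (fuel : Nat) (temp base : Int) (h : temp ≤ 0) :
    f43Digits fuel temp base = [] := by
  cases fuel with
  | zero => rfl
  | succ f => simp [f43Digits]; omega

theorem f43_floordiv_lt (temp base : Int) (ht : 0 < temp) (hb : 2 ≤ base) :
    PySem.Int.floordiv temp base < temp ∧ 0 ≤ PySem.Int.floordiv temp base := by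
  rw [PySem.Int.floordiv_eq_ediv_of_pos (by omega)]
  refine ⟨?_, Int.ediv_nonneg (by omega) (by omega)⟩
  apply Int.ediv_lt_of_lt_mul (by omega)
  nlinarith

-- fuel irrelevance: any fuel ≥ temp.toNat computes the same digit list (base ≥ 2)
theorem f43Digits_fuel (base : Int) (hb : 2 ≤ base) :
    ∀ (f1 : Nat) (temp : Int) (f2 : Nat), temp.toNat ≤ f1 → temp.toNat ≤ f2 →
      f43Digits f1 temp base = f43Digits f2 temp base := by
  intro f1
  induction f1 with
  | zero =>
    intro temp f2 h1 _
    rw [f43Digits_nonpos _ _ _ (by omega), f43Digits_nonpos _ _ _ (by omega)]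
  | succ f ih =>
    intro temp f2 h1 h2
    by_cases ht : 0 < temp
    · obtain ⟨hlt, hq0⟩ := f43_floordiv_lt temp base ht hb
      obtain ⟨g, rfl⟩ : ∃ g, f2 = g + 1 := ⟨f2 - 1, by omega⟩
      simp only [f43Digits, if_pos ht]
      rw [ih (PySem.Int.floordiv temp base) g (by omega) (by omega)]
    · rw [f43Digits_nonpos _ _ _ (by omega), f43Digits_nonpos _ _ _ (by omega)]

-- the heart: incrementing the digit list of m yields the digit list of m + 1 (base ≥ 2)
theorem f43Inc_digits (base : Int) (hb : 2 ≤ base) :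
    ∀ (k : Nat) (m : Int), m.toNat = k → 0 ≤ m → ∀ (f g : Nat), m.toNat ≤ f → (m + 1).toNat ≤ g →
      f43Inc base (f43Digits f m base) = f43Digits g (m + 1) base := by
  intro k
  induction k using Nat.strong_induction_on with
  | _ k ih =>
    intro m hk hm f g hf hg
    obtain ⟨g', rfl⟩ : ∃ g', g = g' + 1 := ⟨g - 1, by omega⟩
    rcases eq_or_lt_of_le hm with h0 | hpos
    · -- m = 0 : inc [] = [1] and digits of 1 are [1]
      subst hk
      rw [f43Digits_nonpos f m base (by omega)]
      have h1 : (0:Int) < m + 1 := by omega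
      simp only [f43Digits, if_pos h1, f43Inc]
      have hm1 : m + 1 = 1 := by omega
      rw [hm1]
      have hdm : (1:Int) / base = 0 ∧ (1:Int) % base = 1 :=
        (Int.ediv_emod_unique (by omega)).mpr ⟨by omega, by omega, by omega⟩
      rw [PySem.Int.floordiv_eq_ediv_of_pos (by omega),
          PySem.Int.mod_eq_emod_of_pos (by omega), hdm.1, hdm.2,
          f43Digits_nonpos g' 0 base (by omega)]
    · -- m ≥ 1
      obtain ⟨f', rfl⟩ : ∃ f', f = f' + 1 := ⟨f - 1, by omega⟩
      have hmpos : (0:Int) < m := hpos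
      obtain ⟨hqlt, hq0⟩ := f43_floordiv_lt m base hmpos hb
      set q := PySem.Int.floordiv m base with hqdef
      set r := PySem.Int.mod m base with hrdef
      have hr0 : 0 ≤ r := PySem.Int.mod_nonneg m (by omega)
      have hrb : r < base := PySem.Int.mod_lt m (by omega)
      have hqr : q * base + r = m := PySem.Int.floordiv_mul_add_mod m base
      simp only [f43Digits, if_pos hmpos, if_pos (show (0:Int) < m + 1 by omega), ← hqdef, ← hrdef]
      by_cases hc : r + 1 = base
      · -- carry: (m+1) % base = 0, (m+1) / base = q + 1
        have hdm : (m + 1) / base = q + 1 ∧ (m + 1) % base = 0 :=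
          (Int.ediv_emod_unique (by omega)).mpr ⟨by nlinarith, by omega, by omega⟩
        simp only [f43Inc, hc, BEq.rfl, if_true]
        rw [PySem.Int.floordiv_eq_ediv_of_pos (show (0:Int) < base by omega),
            PySem.Int.mod_eq_emod_of_pos (show (0:Int) < base by omega), hdm.1, hdm.2]
        congr 1
        exact ih q.toNat (by omega) q rfl hq0 f' g' (by omega) (by omega)
      · -- no carry: (m+1) % base = r + 1, (m+1) / base = q
        have hdm : (m + 1) / base = q ∧ (m + 1) % base = r + 1 :=
          (Int.ediv_emod_unique (by omega)).mpr ⟨by rw [mul_comm q base] at hqr; omega, by omega, by omega⟩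
        have hne : (r + 1 == base) = false := by simp [hc]
        simp only [f43Inc, hne, Bool.false_eq_true, if_false]
        rw [PySem.Int.floordiv_eq_ediv_of_pos (show (0:Int) < base by omega),
            PySem.Int.mod_eq_emod_of_pos (show (0:Int) < base by omega), hdm.1, hdm.2]
        congr 1
        exact f43Digits_fuel base hb f' q g' (by omega) (by omega)

-- the two folds agree over any range m+1 .. m+k, given the carry invariant on cur
theorem f43_loop (base : Int) (hb : 2 ≤ base) :
    ∀ (k : Nat) (m : Int), 0 ≤ m →
      ∀ (acc : List (Int × List Int)) (cur : List Int),
        cur = f43Digits (m.toNat + 1) m base →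
        (PySem.List.pyRange (m + 1) (m + 1 + k) 1).foldl
            (fun res num => res ++ [(num, (f43Digits (num.toNat + 1) num base).reverse)]) acc
          = ((PySem.List.pyRange (m + 1) (m + 1 + k) 1).foldl
              (fun (st : List (Int × List Int) × List Int) num =>
                let cur := f43Inc base st.2
                (st.1 ++ [(num, cur.reverse)], cur)) (acc, cur)).1 := by
  intro k
  induction k with
  | zero =>
    intro m hm acc cur hcur
    rw [PySem.List.pyRange_one_eq_nil (by omega)]
    rfl
  | succ k ih =>
    intro m hm acc cur hcur
    rw [PySem.List.pyRange_one_cons (by omega)]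
    simp only [List.foldl_cons]
    have hinc : f43Inc base cur = f43Digits ((m + 1).toNat + 1) (m + 1) base := by
      rw [hcur]
      exact f43Inc_digits base hb m.toNat m rfl hm (m.toNat + 1) ((m + 1).toNat + 1)
        (by omega) (by omega)
    have hrange : m + 1 + 1 + (k : Int) = m + 1 + (k + 1 : Nat) := by push_cast; ring
    have := ih (m + 1) (by omega) (acc ++ [(m + 1, (f43Digits ((m + 1).toNat + 1) (m + 1) base).reverse)]) (f43Inc base cur) hinc
    rw [hrange] at this
    simpa [hinc] using this

-- ===== VERDICT (by name: the statement is the Claim_ definition above) =====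
theorem f4_3_spec : Claim_equal_f4_3 := by
  intro n base _ hpre
  unfold Spec_f4_3 f4_3 f4_3_alt
  by_cases hn : n ≤ 0
  · rw [PySem.List.pyRange_one_eq_nil (by omega)]
    rfl
  · have hb : 2 ≤ base := by
      rcases hpre with h | h
      · exact h
      · omega
    have hcur : ([] : List Int) = f43Digits ((0:Int).toNat + 1) 0 base := by
      rw [f43Digits_nonpos _ _ _ (by omega)]
    have := f43_loop base hb n.toNat 0 (by omega) [(0, [0])] [] hcur
    have hr : (0:Int) + 1 + (n.toNat : Int) = n + 1 := by omega
    rw [hr] at this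
    exact this
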